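-- pv_equiv track=rewrite | github.com/clintonkopotic/FreeCodeCampDailyCodingChallenges | 2025/10/31 - SpOoKy~CaSe/python/main.py | spookify
-- ===== SOURCE A (Python) =====
-- def spookify(boo):
--     if not isinstance(boo, str):
--         return None
--
--     spookyTilde = boo.replace('_', '~').replace('-', '~')
--     spookyCase = ""
--     capitalizeLetter = True
--
--     for character in spookyTilde:
--         spookyCase += character.upper() if capitalizeLetter else character.lower()
--
--         if character != '~':
--             capitalizeLetter = not capitalizeLetter
--
--     return spookyCase
-- ===== SOURCE B (Python) =====
-- def spookify(boo):
--     if not isinstance(boo, str):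
--         return None
--
--     replaced = boo.replace('_', '~').replace('-', '~')
--     letters = [c for c in replaced if c != '~']
--     cased = [c.upper() if i % 2 == 0 else c.lower() for i, c in enumerate(letters)]
--     it = iter(cased)
--     return ''.join('~' if c == '~' else next(it) for c in replaced)
-- ===== Notes on version B (the rewrite author's own statement) =====
-- stated objective: alternative
-- what changed: A cases characters in one stateful left-to-right loop flipping a flag; B instead filters out the non-tilde characters, case-alternates that subsequence by index parity in a comprehension, and reweaves it with the tildes via an iterator and join.
import Mathlib
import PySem

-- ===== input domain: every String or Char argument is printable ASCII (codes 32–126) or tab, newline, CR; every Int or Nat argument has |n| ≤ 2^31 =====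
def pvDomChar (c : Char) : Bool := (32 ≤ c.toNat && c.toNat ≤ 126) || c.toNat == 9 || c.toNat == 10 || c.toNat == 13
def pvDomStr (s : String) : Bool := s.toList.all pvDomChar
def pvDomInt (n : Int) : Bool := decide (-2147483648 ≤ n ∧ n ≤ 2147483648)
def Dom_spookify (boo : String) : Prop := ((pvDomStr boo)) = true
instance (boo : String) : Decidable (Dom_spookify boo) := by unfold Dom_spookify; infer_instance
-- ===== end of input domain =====

-- B: filter-then-case-then-reweave decomposition instead of A's single stateful loop (objective: alternative; same cost).

-- ===== PORT A =====
-- A's loop: append the cased character, flip the flag on every non-tilde character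
def spookifyLoop : List Char → Bool → List Char
  | [], _ => []
  | c :: rest, cap =>
    (if cap then PySem.Chars.upperChar c else PySem.Chars.lowerChar c) ::
      spookifyLoop rest (if c != '~' then !cap else cap)

def spookify (boo : String) : Option String :=
  let spookyTilde := PySem.Str.replace (PySem.Str.replace boo "_" "~") "-" "~"
  some (String.mk (spookifyLoop spookyTilde.toList true))

-- ===== PORT B =====
-- Source B's comprehension over enumerate(letters): upper at even running index, lower at odd
def caseAlt : Nat → List Char → List Char
  | _, [] => []
  | i, c :: cs =>
    (if i % 2 = 0 then PySem.Chars.upperChar c else PySem.Chars.lowerChar c) :: caseAlt (i + 1) cs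

-- Source B's join over the replaced string: '~' copied through, otherwise pull next cased character
def weave : List Char → List Char → List Char
  | [], _ => []
  | c :: rest, cs =>
    if c = '~' then '~' :: weave rest cs
    else
      match cs with
      | [] => []              -- iterator exhausted: unreachable for the inputs Source B builds
      | d :: ds => d :: weave rest ds

def spookify_alt (boo : String) : Option String :=
  let replaced := (PySem.Str.replace (PySem.Str.replace boo "_" "~") "-" "~").toList
  let letters := replaced.filter (fun c => c != '~')
  let cased := caseAlt 0 letters
  some (String.mk (weave replaced cased))

-- ===== PRECONDITION & SPEC =====
def Spec_spookify (boo : String) (out : Option String) : Prop := out = spookify_alt boo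
instance (boo : String) (out : Option String) : Decidable (Spec_spookify boo out) := by unfold Spec_spookify; infer_instance

-- ===== CLAIM (what is proved, stated in full; the proofs are below) =====
def Claim_equal_spookify : Prop := ∀ (boo : String), Dom_spookify boo → Spec_spookify boo (spookify boo)

-- ===== LEMMAS AND PROOFS =====
lemma succ_mod_two (i : Nat) : decide ((i + 1) % 2 = 0) = !decide (i % 2 = 0) := by
  rcases Nat.mod_two_eq_zero_or_one i with h | h <;> simp [Nat.add_mod, h]

lemma tilde_case : PySem.Chars.upperChar '~' = '~' ∧ PySem.Chars.lowerChar '~' = '~' := by decide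

lemma weave_caseAlt (t : List Char) (i : Nat) :
    weave t (caseAlt i (t.filter (fun c => c != '~'))) = spookifyLoop t (decide (i % 2 = 0)) := by
  induction t generalizing i with
  | nil => simp [weave, spookifyLoop]
  | cons c rest ih =>
    by_cases hc : c = '~'
    · subst hc
      simp only [List.filter_cons, spookifyLoop, weave]
      simp [tilde_case.1, tilde_case.2, ih i]
    · simp only [List.filter_cons, if_pos (by simp [hc] : (c != '~') = true), caseAlt, weave,
        if_neg hc, spookifyLoop]
      rw [ih (i + 1), succ_mod_two]
      by_cases hm : i % 2 = 0 <;> simp [hm]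

theorem spookify_spec_aux (boo : String) : spookify boo = spookify_alt boo := by
  unfold spookify spookify_alt
  have := weave_caseAlt (PySem.Str.replace (PySem.Str.replace boo "_" "~") "-" "~").toList 0
  simp at this
  simp [this]

-- ===== VERDICT (by name: the statement is the Claim_ definition above) =====
theorem spookify_spec : Claim_equal_spookify := by
  intro boo _
  unfold Spec_spookify
  exact spookify_spec_aux boo
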